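-- pv_equiv track=rewrite | github.com/AMBGEUPRD/CCCPDemo | src/Tableau2PowerBI/agents/assembler/__init__.py | _parse_tmdl_table_name
-- ===== SOURCE A (Python) =====
-- def _parse_tmdl_table_name(declaration_line: str) -> str:
--     """Extract the table name from a TMDL ``table`` declaration line.
--
--     Handles both quoted (``table 'Name'``) and unquoted (``table Name``)
--     forms and unescapes internal ``''`` sequences.
--     """
--     name_part = declaration_line.strip()[6:].strip()  # strip "table "
--     if name_part.startswith("'"):
--         i, chars = 1, []
--         while i < len(name_part):
--             ch = name_part[i]
--             if ch == "'":
--                 if i + 1 < len(name_part) and name_part[i + 1] == "'":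
--                     chars.append("'")
--                     i += 2
--                 else:
--                     break
--             else:
--                 chars.append(ch)
--                 i += 1
--         return "".join(chars)
--     return name_part.rstrip()
-- ===== SOURCE B (Python) =====
-- def _parse_tmdl_table_name(declaration_line: str) -> str:
--     """Split-based rewrite: cut the body on escaped '' pairs, keep pieces up to
--     the first piece holding a lone quote (truncated there), rejoin with '."""
--     name_part = declaration_line.strip()[6:].strip()  # strip "table "
--     if not name_part.startswith("'"):
--         return name_part.rstrip()
--     kept = []
--     for piece in name_part[1:].split("''"):
--         j = piece.find("'")
--         if j >= 0:
--             kept.append(piece[:j])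
--             break
--         kept.append(piece)
--     return "'".join(kept)
-- ===== Notes on version B (the rewrite author's own statement) =====
-- stated objective: idiomatic
-- what changed: The quoted branch's manual index/lookahead while-loop is replaced by splitting the body on escaped '' pairs, truncating at the first piece containing a lone quote, and rejoining the kept pieces with ' (no index arithmetic).
import Mathlib
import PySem

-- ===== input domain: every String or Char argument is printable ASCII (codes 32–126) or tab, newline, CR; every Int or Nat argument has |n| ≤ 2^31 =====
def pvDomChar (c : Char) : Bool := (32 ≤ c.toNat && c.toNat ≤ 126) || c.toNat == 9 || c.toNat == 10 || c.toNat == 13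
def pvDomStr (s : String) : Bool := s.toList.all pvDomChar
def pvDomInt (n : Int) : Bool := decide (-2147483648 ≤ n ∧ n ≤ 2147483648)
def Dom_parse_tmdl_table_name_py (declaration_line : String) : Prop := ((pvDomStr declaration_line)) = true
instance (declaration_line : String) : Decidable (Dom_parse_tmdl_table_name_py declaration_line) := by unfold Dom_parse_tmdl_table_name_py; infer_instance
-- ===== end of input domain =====

-- B replaces A's manual index/lookahead while-loop over the quoted body by
-- split-on-"''" / truncate-at-first-lone-quote / rejoin-with-"'" (objective: idiomatic).

-- ===== PORT A =====
-- A's while-loop: i is the scan index, chars the accumulator of "".join(chars)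
def pvALoop (cs : List Char) (i : Nat) (chars : List Char) : List Char :=
  if h : i < cs.length then
    let ch := cs[i]
    if ch = '\'' then
      if i + 1 < cs.length ∧ cs.getD (i + 1) ' ' = '\'' then
        pvALoop cs (i + 2) (chars ++ ['\''])
      else chars
    else pvALoop cs (i + 1) (chars ++ [ch])
  else chars
termination_by cs.length - i

def parse_tmdl_table_name_py (declaration_line : String) : String :=
  let name_part := PySem.Chars.strip (PySem.Chars.slice (PySem.Chars.strip declaration_line.toList) (some 6) none)
  if PySem.Chars.startswith name_part ['\''] then
    String.ofList (pvALoop name_part 1 [])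
  else
    String.ofList (PySem.Chars.rstrip name_part)

-- ===== PORT B =====
-- Source B's for-loop over name_part[1:].split("''"): keep quote-free pieces,
-- truncate at the first piece holding a lone quote and stop (the 'break')
def pvBPieces (pieces : List (List Char)) : List (List Char) :=
  match pieces with
  | [] => []
  | p :: rest =>
    let j := PySem.Chars.find p ['\'']
    if 0 ≤ j then [PySem.Chars.slice p none (some j)]
    else p :: pvBPieces rest

def parse_tmdl_table_name_py_alt (declaration_line : String) : String :=
  let name_part := PySem.Chars.strip (PySem.Chars.slice (PySem.Chars.strip declaration_line.toList) (some 6) none)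
  if PySem.Chars.startswith name_part ['\''] then
    String.ofList (PySem.Chars.join ['\'']
      (pvBPieces (PySem.Chars.splitOn (PySem.Chars.slice name_part (some 1) none) ['\'', '\''])))
  else
    String.ofList (PySem.Chars.rstrip name_part)

-- ===== PRECONDITION & SPEC =====
def Spec_parse_tmdl_table_name_py (declaration_line : String) (out : String) : Prop := out = parse_tmdl_table_name_py_alt declaration_line
instance (declaration_line : String) (out : String) : Decidable (Spec_parse_tmdl_table_name_py declaration_line out) := by unfold Spec_parse_tmdl_table_name_py; infer_instance

-- ===== CLAIM (what is proved, stated in full; the proofs are below) =====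
def Claim_equal_parse_tmdl_table_name_py : Prop := ∀ (declaration_line : String), Dom_parse_tmdl_table_name_py declaration_line → Spec_parse_tmdl_table_name_py declaration_line (parse_tmdl_table_name_py declaration_line)

-- ===== LEMMAS AND PROOFS =====

-- the mathematical content of A's loop: scan the body, unescaping '' and stopping at a lone '
def pvScan : List Char → List Char
  | [] => []
  | c :: r =>
    if c = '\'' then
      match r with
      | '\'' :: r' => '\'' :: pvScan r'
      | _ => []
    else c :: pvScan r

theorem pvScan_pair (r : List Char) : pvScan ('\'' :: '\'' :: r) = '\'' :: pvScan r := rfl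

theorem pvScan_quote_cons (d : Char) (r : List Char) (hd : d ≠ '\'') :
    pvScan ('\'' :: d :: r) = [] := by
  rw [pvScan, if_pos rfl]
  intro r' heq
  exact hd (List.head_eq_of_cons_eq heq)

theorem pvScan_cons (c : Char) (r : List Char) (hc : c ≠ '\'') :
    pvScan (c :: r) = c :: pvScan r := by
  rw [pvScan.eq_def]
  simp only []
  rw [if_neg hc]

-- split on "''" as a structural recursion (shown below to equal PySem.Chars.splitOn _ ['\'','\''])
def pvSplit : List Char → List (List Char)
  | '\'' :: '\'' :: r => [] :: pvSplit r
  | c :: r =>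
    match pvSplit r with
    | [] => [[c]]
    | h0 :: t => (c :: h0) :: t
  | [] => [[]]

theorem pvSplit_nil : pvSplit [] = [[]] := rfl

theorem pvSplit_pair (r : List Char) : pvSplit ('\'' :: '\'' :: r) = [] :: pvSplit r := rfl

theorem pvSplit_ne_nil (l : List Char) : pvSplit l ≠ [] := by
  rw [pvSplit.eq_def]
  split
  · simp
  · split <;> simp
  · simp

theorem pvSplit_cons' (c : Char) (r : List Char) (h0 : List Char) (t : List (List Char))
    (hnot : ¬(c = '\'' ∧ r.head? = some '\'')) (hr : pvSplit r = h0 :: t) :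
    pvSplit (c :: r) = (c :: h0) :: t := by
  rw [pvSplit.eq_def]
  split
  · next r' heq =>
    exfalso
    apply hnot
    have h1 := List.head_eq_of_cons_eq heq
    have h2 := List.tail_eq_of_cons_eq heq
    exact ⟨h1, by rw [h2]; rfl⟩
  · next c' r' hno heq =>
    have h1 := List.head_eq_of_cons_eq heq
    have h2 := List.tail_eq_of_cons_eq heq
    subst h1; subst h2
    rw [hr]
  · contradiction

theorem pvBPieces_ne_nil (ps : List (List Char)) (h : ps ≠ []) : pvBPieces ps ≠ [] := by
  match ps with
  | [] => exact absurd rfl h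
  | p :: rest =>
    rw [pvBPieces]
    split <;> simp

theorem pvALoop_eq_scan (cs : List Char) (i : Nat) (chars : List Char) :
    pvALoop cs i chars = chars ++ pvScan (cs.drop i) := by
  rw [pvALoop]
  split
  case isFalse h =>
    rw [List.drop_eq_nil_of_le (by omega)]
    simp [pvScan]
  case isTrue h =>
    have hdrop : cs.drop i = cs[i] :: cs.drop (i + 1) := by
      rw [List.getElem_cons_drop]
    by_cases hq : cs[i] = '\''
    · rw [if_pos hq]
      by_cases h2 : i + 1 < cs.length ∧ cs.getD (i + 1) ' ' = '\''
      · rw [if_pos h2]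
        obtain ⟨h2a, h2b⟩ := h2
        have hdrop2 : cs.drop (i + 1) = cs[i + 1] :: cs.drop (i + 2) := by
          rw [List.getElem_cons_drop]
        have hb : cs[i + 1] = '\'' := by
          rwa [List.getD_eq_getElem _ _ h2a] at h2b
        rw [pvALoop_eq_scan cs (i + 2) (chars ++ ['\''])]
        rw [hdrop, hdrop2, hq, hb, pvScan_pair]
        simp
      · rw [if_neg h2]
        rw [hdrop, hq]
        rcases hrest : cs.drop (i + 1) with _ | ⟨d, r'⟩
        · rw [show pvScan ['\''] = [] from rfl]
          simp
        · have hlen : i + 1 < cs.length := by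
            have hl := congrArg List.length hrest
            simp at hl
            omega
          have hdrop2 : cs.drop (i + 1) = cs[i + 1] :: cs.drop (i + 2) := by
            rw [List.getElem_cons_drop]
          rw [hdrop2] at hrest
          have hdd : cs[i + 1] = d := List.head_eq_of_cons_eq hrest
          have hd : d ≠ '\'' := by
            intro hdq
            apply h2
            refine ⟨hlen, ?_⟩
            rw [List.getD_eq_getElem _ _ hlen, hdd, hdq]
          rw [pvScan_quote_cons d r' hd]
          simp
    · rw [if_neg hq]
      rw [pvALoop_eq_scan cs (i + 1) (chars ++ [cs[i]])]
      rw [hdrop, pvScan_cons _ _ hq]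
      simp
termination_by cs.length - i

theorem pvSplitOn_go_eq (fuel : Nat) (l cur : List Char) (acc : List (List Char))
    (hf : l.length < fuel) :
    PySem.Chars.splitOn.go ['\'', '\''] fuel l cur acc =
      acc.reverse ++
        (match pvSplit l with
         | [] => [cur.reverse]
         | h :: t => (cur.reverse ++ h) :: t) := by
  induction fuel generalizing l cur acc with
  | zero => omega
  | succ n ih =>
    match l with
    | [] =>
      rw [PySem.Chars.splitOn.go]
      · rw [pvSplit_nil]
        simp
      · intro h; omega
    | c :: rest =>
      rw [PySem.Chars.splitOn.go]
      by_cases hp : List.isPrefixOf ['\'', '\''] (c :: rest)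
      · rw [if_pos hp]
        match rest with
        | [] => simp [List.isPrefixOf] at hp
        | d :: r' =>
          simp [List.isPrefixOf] at hp
          obtain ⟨hc', hd'⟩ := hp
          subst hc'; subst hd'
          rw [show List.drop (['\'', '\''] : List Char).length ('\'' :: '\'' :: r') = r' from rfl]
          have hlen2 : r'.length < n := by
            simp at hf
            omega
          rw [ih r' [] (cur.reverse :: acc) hlen2, pvSplit_pair]
          rcases hps : pvSplit r' with _ | ⟨g0, t0⟩
          · exact absurd hps (pvSplit_ne_nil r')
          · simp
      · rw [if_neg hp]
        have hlen1 : rest.length < n := by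
          simp at hf
          omega
        rw [ih _ _ _ hlen1]
        have hshape : ¬ (c = '\'' ∧ rest.head? = some '\'') := by
          rintro ⟨hc, hh⟩
          apply hp
          match rest with
          | [] => simp at hh
          | d :: r' =>
            simp at hh
            simp [List.isPrefixOf, hc, hh]
        rcases hps : pvSplit rest with _ | ⟨g0, t0⟩
        · exact absurd hps (pvSplit_ne_nil rest)
        · rw [pvSplit_cons' c rest g0 t0 hshape hps]
          simp

theorem pvSplitOn_eq (l : List Char) :
    PySem.Chars.splitOn l ['\'', '\''] = pvSplit l := by
  rw [PySem.Chars.splitOn]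
  rw [pvSplitOn_go_eq (l.length + 1) l [] [] (by omega)]
  rcases hps : pvSplit l with _ | ⟨h0, t0⟩
  · exact absurd hps (pvSplit_ne_nil l)
  · simp

-- find.go of "'" : shift lemma and value shape
theorem pvFindGo_succ (l : List Char) (k : Nat) :
    PySem.Chars.find.go ['\''] l (k + 1) =
      if PySem.Chars.find.go ['\''] l k = -1 then -1
      else PySem.Chars.find.go ['\''] l k + 1 := by
  induction l generalizing k with
  | nil =>
    rw [PySem.Chars.find.go, PySem.Chars.find.go]
    simp
  | cons c r ih =>
    rw [PySem.Chars.find.go]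
    conv_rhs => rw [PySem.Chars.find.go]
    by_cases hp : List.isPrefixOf ['\''] (c :: r)
    · rw [if_pos hp, if_pos hp]
      have hk : ((k : Int)) ≠ -1 := by omega
      simp [hk]
    · rw [if_neg hp, if_neg hp]
      exact ih (k + 1)

theorem pvFindGo_cases (l : List Char) (k : Nat) :
    PySem.Chars.find.go ['\''] l k = -1 ∨ ∃ j : Nat, PySem.Chars.find.go ['\''] l k = (j : Int) := by
  induction l generalizing k with
  | nil =>
    rw [PySem.Chars.find.go]
    simp
  | cons c r ih =>
    rw [PySem.Chars.find.go]
    by_cases hp : List.isPrefixOf ['\''] (c :: r)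
    · rw [if_pos hp]; exact Or.inr ⟨k, rfl⟩
    · rw [if_neg hp]; exact ih (k + 1)

theorem pvFind_cons_quote (h : List Char) :
    PySem.Chars.find ('\'' :: h) ['\''] = 0 := by
  rw [PySem.Chars.find, PySem.Chars.find.go]
  simp [List.isPrefixOf]

theorem pvFind_cons_ne (c : Char) (h : List Char) (hc : c ≠ '\'') :
    PySem.Chars.find (c :: h) ['\''] =
      if PySem.Chars.find h ['\''] = -1 then -1 else PySem.Chars.find h ['\''] + 1 := by
  rw [PySem.Chars.find, PySem.Chars.find.go]
  have hp : ¬ List.isPrefixOf ['\''] (c :: h) = true := by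
    simp [List.isPrefixOf]
    exact fun hh => hc hh.symm
  rw [if_neg hp]
  exact pvFindGo_succ h 0

-- one cons step of B's join over the pieces, for a non-quote first char
theorem pvJoin_cons (c : Char) (h0 : List Char) (bs : List (List Char)) :
    PySem.Chars.join ['\''] ((c :: h0) :: bs) = c :: PySem.Chars.join ['\''] (h0 :: bs) := by
  cases bs with
  | nil => simp [PySem.Chars.join, List.intercalate]
  | cons b bt => simp [PySem.Chars.join, List.intercalate]

theorem pvScan_eq (t : List Char) :
    pvScan t = PySem.Chars.join ['\''] (pvBPieces (pvSplit t)) := by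
  match t with
  | [] => decide
  | c :: r =>
    by_cases hc : c = '\''
    · subst hc
      match r with
      | [] => decide
      | d :: r' =>
        by_cases hd : d = '\''
        · subst hd
          rw [pvSplit_pair]
          rw [pvBPieces]
          simp only [show PySem.Chars.find ([] : List Char) ['\''] = -1 from rfl]
          rw [if_neg (by norm_num)]
          rcases hbs : pvBPieces (pvSplit r') with _ | ⟨b0, bt⟩
          · exact absurd hbs (pvBPieces_ne_nil _ (pvSplit_ne_nil r'))
          · have hj : PySem.Chars.join ['\''] ([] :: b0 :: bt) =
                '\'' :: PySem.Chars.join ['\''] (b0 :: bt) := by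
              simp [PySem.Chars.join, List.intercalate]
            rw [hj, ← hbs, ← pvScan_eq r', pvScan_pair]
        · rcases hps : pvSplit (d :: r') with _ | ⟨h0, t0⟩
          · exact absurd hps (pvSplit_ne_nil _)
          · have hnot : ¬('\'' = '\'' ∧ (d :: r').head? = some '\'') := by
              rintro ⟨-, hh⟩
              exact hd (Option.some.inj hh)
            rw [pvSplit_cons' '\'' (d :: r') h0 t0 hnot hps]
            rw [pvBPieces]
            simp only [pvFind_cons_quote]
            rw [if_pos (by norm_num)]
            have hs0 : PySem.Chars.slice ('\'' :: h0) none (some 0) = [] := by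
              simp [PySem.Chars.slice, PySem.List.slice, PySem.List.clampIdx]
            rw [hs0, pvScan_quote_cons d r' hd]
            simp [PySem.Chars.join, List.intercalate]
    · rcases hps : pvSplit r with _ | ⟨h0, t0⟩
      · exact absurd hps (pvSplit_ne_nil _)
      · rw [pvSplit_cons' c r h0 t0 (fun hh => hc hh.1) hps]
        rw [pvScan_cons c r hc, pvScan_eq r, hps]
        rcases pvFindGo_cases h0 0 with hneg | ⟨j, hj⟩
        · have hfh : PySem.Chars.find h0 ['\''] = -1 := by
            rw [PySem.Chars.find]; exact hneg
          have hfc : PySem.Chars.find (c :: h0) ['\''] = -1 := by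
            rw [pvFind_cons_ne c h0 hc, if_pos hfh]
          rw [pvBPieces, pvBPieces]
          simp only [hfh, hfc]
          rw [if_neg (by norm_num), if_neg (by norm_num)]
          exact (pvJoin_cons c h0 (pvBPieces t0)).symm
        · have hfh : PySem.Chars.find h0 ['\''] = (j : Int) := by
            rw [PySem.Chars.find]; exact hj
          have hfc : PySem.Chars.find (c :: h0) ['\''] = ((j : Int) + 1) := by
            rw [pvFind_cons_ne c h0 hc, hfh, if_neg (by omega)]
          rw [pvBPieces, pvBPieces]
          simp only [hfh, hfc]
          rw [if_pos (by omega), if_pos (by omega)]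
          have hcast : ((j : Int) + 1) = ((j + 1 : Nat) : Int) := by push_cast; ring
          have hs1 : PySem.Chars.slice (c :: h0) none (some ((j : Int) + 1)) = c :: h0.take j := by
            rw [PySem.Chars.slice, hcast, PySem.List.slice_to_natCast, List.take_succ_cons]
          have hs2 : PySem.Chars.slice h0 none (some ((j : Int))) = h0.take j := by
            rw [PySem.Chars.slice, PySem.List.slice_to_natCast]
          rw [hs1, hs2]
          simp [PySem.Chars.join, List.intercalate]
termination_by t.length
decreasing_by all_goals (simp only [List.length_cons]; omega)

theorem pvMain (np : List Char) :
    (if PySem.Chars.startswith np ['\''] then String.ofList (pvALoop np 1 [])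
     else String.ofList (PySem.Chars.rstrip np)) =
    (if PySem.Chars.startswith np ['\''] then
       String.ofList (PySem.Chars.join ['\'']
         (pvBPieces (PySem.Chars.splitOn (PySem.Chars.slice np (some 1) none) ['\'', '\''])))
     else String.ofList (PySem.Chars.rstrip np)) := by
  by_cases hb : PySem.Chars.startswith np ['\''] = true
  · rw [if_pos hb, if_pos hb]
    congr 1
    rw [pvALoop_eq_scan np 1 []]
    have hslice : PySem.Chars.slice np (some 1) none = np.drop 1 := by
      rw [PySem.Chars.slice, PySem.List.slice_from_one, List.drop_one]
    rw [hslice, pvSplitOn_eq, pvScan_eq]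
    simp
  · rw [if_neg hb, if_neg hb]

-- ===== VERDICT (by name: the statement is the Claim_ definition above) =====
theorem parse_tmdl_table_name_py_spec : Claim_equal_parse_tmdl_table_name_py := by
  intro s _hDom
  unfold Spec_parse_tmdl_table_name_py parse_tmdl_table_name_py parse_tmdl_table_name_py_alt
  exact pvMain _
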